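-- pv_equiv track=rewrite | github.com/patrickpichler/advent-of-code | day16.py | parse_value_packet
-- ===== SOURCE A (Python) =====
-- def parse_value_packet(data: str) -> tuple[int, str]:
--     result: str = ""
--     rest: str = ""
--
--     for n in range(0, len(data), 5):
--         if data[n] == "0":
--             result = result + data[n + 1 : n + 5]
--             rest = data[n + 5 :]
--             break
--
--         result = result + data[n + 1 : n + 5]
--
--     return int(result, 2), rest
-- ===== SOURCE B (Python) =====
-- def parse_value_packet(data: str) -> tuple[int, str]:
--     markers = data[0::5]                       # first bit of every 5-bit group
--     i = markers.find("0")
--     g = i if i >= 0 else len(markers) - 1      # no zero marker: consume all groups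
--     result = "".join(data[5 * k + 1 : 5 * k + 5] for k in range(g + 1))
--     return int(result, 2), data[5 * (g + 1) :]
-- ===== Notes on version B (the rewrite author's own statement) =====
-- stated objective: alternative
-- what changed: Replaced the scan-with-break loop by a find-boundary-then-gather decomposition: build the strided marker string data[0::5], locate the first zero marker (else the last group), then join all payload slices and cut the rest in one step.
import Mathlib
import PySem

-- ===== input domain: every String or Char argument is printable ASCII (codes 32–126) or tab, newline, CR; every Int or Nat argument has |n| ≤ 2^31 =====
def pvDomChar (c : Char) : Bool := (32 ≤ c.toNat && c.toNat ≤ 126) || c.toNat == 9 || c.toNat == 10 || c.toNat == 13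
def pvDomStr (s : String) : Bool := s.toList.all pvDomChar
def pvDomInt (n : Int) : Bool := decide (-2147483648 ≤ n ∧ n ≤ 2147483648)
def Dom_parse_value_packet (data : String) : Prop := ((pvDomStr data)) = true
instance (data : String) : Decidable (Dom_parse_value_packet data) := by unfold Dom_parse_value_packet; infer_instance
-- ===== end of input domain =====

-- B replaces A's scan-with-break loop by a find-the-'0'-marker-then-gather decomposition (alternative, same cost).


-- ===== PORT A =====
-- exact port of Python `int(s, 2)` wherever int succeeds (whitespace strip, optional sign,
-- underscores between binary digits — exactly the inputs Pre_ admits); shared by both ports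
def pyIsSpace (c : Char) : Bool :=
  c == ' ' || c == '\t' || c == '\n' || c == '\r' || c.toNat == 11 || c.toNat == 12

def pyStrip (l : List Char) : List Char :=
  ((l.dropWhile pyIsSpace).reverse.dropWhile pyIsSpace).reverse

def bin2core (l : List Char) : Int :=
  l.foldl (fun a c => if c = '_' then a else 2 * a + (if c = '1' then 1 else 0)) 0

def pyInt2 (l : List Char) : Int :=
  match pyStrip l with
  | '-' :: r => -(bin2core r)
  | '+' :: r => bin2core r
  | r => bin2core r

-- the `for n in range(0, len(data), 5)` loop with its break, as structural recursion on the index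
def parseA_loop (data : List Char) (n : Nat) (result : List Char) : List Char × List Char :=
  if _h : n < data.length then
    if PySem.List.pyGet? data (n : Int) = some '0' then
      (result ++ PySem.List.slice data (some ((n : Int) + 1)) (some ((n : Int) + 5)),
       PySem.List.slice data (some ((n : Int) + 5)) none)
    else
      parseA_loop data (n + 5) (result ++ PySem.List.slice data (some ((n : Int) + 1)) (some ((n : Int) + 5)))
  else (result, [])
termination_by data.length - n
decreasing_by omega

def parse_value_packet (data : String) : Int × String :=
  let r := parseA_loop data.toList 0 []
  (pyInt2 r.1, String.ofList r.2)

-- ===== PORT B =====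
-- data[0::5] (stride-5 slice starting at 0), ported by hand; exact for this start/step
def strided5 : List Char → List Char
  | [] => []
  | c :: t => c :: strided5 (t.drop 4)
termination_by l => l.length
decreasing_by simp

def parse_value_packet_alt (data : String) : Int × String :=
  let l := data.toList
  let markers := strided5 l
  -- g = markers.index('0') if '0' in markers else len(markers) - 1 (index? is some iff the char occurs)
  let g : Int :=
    match PySem.List.index? markers '0' with
    | some i => (i : Int)
    | none => (markers.length : Int) - 1
  let result := ((PySem.List.pyRange 0 (g + 1) 1).map
      (fun k => PySem.List.slice l (some (5 * k + 1)) (some (5 * k + 5)))).flatten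
  (pyInt2 result, String.ofList (PySem.List.slice l (some (5 * (g + 1))) none))

-- ===== PRECONDITION & SPEC =====
-- the boundary group: the first 5-char group whose first char is a zero bit (else the last group)
def pvGroups (n : Nat) : Nat := (n + 4) / 5

def pvBoundary (l : List Char) : Nat :=
  match (List.range (pvGroups l.length)).find? (fun i => l.getD (5 * i) ' ' == '0') with
  | some i => i
  | none => pvGroups l.length - 1

-- the payload of the consumed groups: the characters of the first boundary+1 groups
-- whose position is not a group-leading marker position (a multiple of 5)
def pvPayload (l : List Char) : List Char :=
  (((l.take (5 * (pvBoundary l + 1))).zipIdx.filter (fun p => !(p.2 % 5 == 0))).map (·.1))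

def pvIsBin (c : Char) : Bool := c == '0' || c == '1'

-- Python base-2 int-literal grammar: optional surrounding whitespace, optional sign,
-- binary digits with single underscores between digits
def pvBinBody : List Char → Bool
  | [] => false
  | [c] => pvIsBin c
  | c :: '_' :: r => pvIsBin c && pvBinBody r
  | c :: r => pvIsBin c && pvBinBody r

def pvBinLiteral (l : List Char) : Bool :=
  match pyStrip l with
  | '+' :: r => pvBinBody r
  | '-' :: r => pvBinBody r
  | r => pvBinBody r

-- Pre_ holds exactly when the payload of the consumed groups is a valid Python base-2
-- literal, i.e. exactly where int(result, 2) succeeds; on every other input A raises ValueError.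
def Pre_parse_value_packet (data : String) : Prop :=
  pvBinLiteral (pvPayload data.toList) = true
instance (data : String) : Decidable (Pre_parse_value_packet data) := by
  unfold Pre_parse_value_packet; infer_instance
def pvWitness_parse_value_packet : String := "11010"

def Spec_parse_value_packet (data : String) (out : Int × String) : Prop := out = parse_value_packet_alt data
instance (data : String) (out : Int × String) : Decidable (Spec_parse_value_packet data out) := by unfold Spec_parse_value_packet; infer_instance

-- ===== CLAIM (what is proved, stated in full; the proofs are below) =====
def Claim_equal_parse_value_packet : Prop := ∀ (data : String), Dom_parse_value_packet data → Pre_parse_value_packet data → Spec_parse_value_packet data (parse_value_packet data)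

-- ===== LEMMAS AND PROOFS =====

def goSpec : List Char → List Char × List Char
  | [] => ([], [])
  | c :: t =>
    if c = '0' then (t.take 4, t.drop 4)
    else ((t.take 4) ++ (goSpec (t.drop 4)).1, (goSpec (t.drop 4)).2)
termination_by l => l.length
decreasing_by simp

theorem sliceA (l : List Char) (n : Nat) :
    PySem.List.slice l (some ((n:Int)+1)) (some ((n:Int)+5)) = (l.drop (n+1)).take 4 := by
  rw [PySem.List.slice_toNat l (by omega) (by omega)]
  congr 1; omega

theorem sliceF (l : List Char) (n : Nat) :
    PySem.List.slice l (some ((n:Int)+5)) none = l.drop (n+5) := by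
  rw [PySem.List.slice_from l (by omega)]
  congr 1

theorem parseA_eq (l : List Char) (n : Nat) (res : List Char) :
    parseA_loop l n res = (res ++ (goSpec (l.drop n)).1, (goSpec (l.drop n)).2) := by
  fun_induction parseA_loop l n res with
  | case1 n res h h0 =>
    rw [List.drop_eq_getElem_cons h]
    have hx : l[n] = '0' := by
      rw [PySem.List.pyGet?_natCast] at h0
      simpa [List.getElem?_eq_getElem h] using h0
    rw [goSpec, if_pos hx, sliceA, sliceF]
    simp [List.drop_drop]
  | case2 n res h h0 ih =>
    have hx : ¬ l[n] = '0' := by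
      rw [PySem.List.pyGet?_natCast] at h0
      simpa [List.getElem?_eq_getElem h] using h0
    rw [ih, List.drop_eq_getElem_cons h, goSpec, if_neg hx, sliceA]
    simp [List.drop_drop]
  | case3 n res h =>
    rw [List.drop_eq_nil_iff.mpr (by omega)]
    simp [goSpec]

def gB (l : List Char) : Int :=
  match PySem.List.index? (strided5 l) '0' with
  | some i => (i : Int)
  | none => ((strided5 l).length : Int) - 1

def bPair (l : List Char) : List Char × List Char :=
  (((PySem.List.pyRange 0 (gB l + 1) 1).map
      (fun k => PySem.List.slice l (some (5 * k + 1)) (some (5 * k + 5)))).flatten,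
   PySem.List.slice l (some (5 * (gB l + 1))) none)

theorem alt_eq_bPair (data : String) :
    parse_value_packet_alt data = (pyInt2 (bPair data.toList).1, String.ofList (bPair data.toList).2) := rfl

theorem gB_ge_neg_one (l : List Char) : -1 ≤ gB l := by
  unfold gB
  cases h : PySem.List.index? (strided5 l) '0' with
  | none => simp; omega
  | some i => simp

theorem gB_cons (c : Char) (t : List Char) (hc : ¬ c = '0') :
    gB (c :: t) = gB (t.drop 4) + 1 := by
  unfold gB
  rw [strided5, PySem.List.index?_cons_of_ne _ (Ne.symm (Ne.symm hc))]
  cases h : PySem.List.index? (strided5 (t.drop 4)) '0' with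
  | none => simp
  | some i => simp


theorem pyRange_map_shift {α : Type} (b : Int) (f : Int → α) :
    (PySem.List.pyRange 1 (b + 1)).map f = (PySem.List.pyRange 0 b).map (fun k => f (k + 1)) := by
  rw [PySem.List.pyRange_one 1 (b+1), PySem.List.pyRange_one 0 b]
  simp [List.map_map]
  intro a _
  rw [add_comm]

theorem slice_drop5 (l : List Char) (k : Int) (hk : 0 ≤ k) :
    PySem.List.slice l (some (5 * (k + 1) + 1)) (some (5 * (k + 1) + 5)) =
    PySem.List.slice (l.drop 5) (some (5 * k + 1)) (some (5 * k + 5)) := by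
  rw [PySem.List.slice_toNat l (by omega) (by omega),
      PySem.List.slice_toNat (l.drop 5) (by omega) (by omega)]
  rw [List.drop_drop]
  congr 1
  · omega
  · congr 1; omega


theorem gB_cons_zero (t : List Char) : gB ('0' :: t) = 0 := by
  unfold gB
  rw [strided5, PySem.List.index?_cons_self]
  rfl

theorem slice_head4 (c : Char) (t : List Char) :
    PySem.List.slice (c :: t) (some 1) (some 5) = t.take 4 := by
  rw [PySem.List.slice_toNat (c :: t) (by omega) (by omega)]
  rfl

theorem bPair_eq (l : List Char) : bPair l = goSpec l := by
  induction hN : l.length using Nat.strong_induction_on generalizing l with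
  | _ N ih =>
    cases l with
    | nil =>
      simp [bPair, gB, strided5, goSpec, PySem.List.pyRange_one_eq_nil, PySem.List.slice]
    | cons c t =>
      by_cases hc : c = '0'
      · subst hc
        unfold bPair
        rw [gB_cons_zero, goSpec]
        have h01 : PySem.List.pyRange (0:Int) 1 = [0] := by
          have := PySem.List.pyRange_one_singleton (0:Int)
          simpa using this
        norm_num [h01]
        constructor
        · exact slice_head4 _ _
        · rw [PySem.List.slice_from _ (by omega)]
          simp
      · have hg := gB_cons c t hc
        have hge := gB_ge_neg_one (t.drop 4)
        have IH : bPair (t.drop 4) = goSpec (t.drop 4) := by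
          apply ih (t.drop 4).length ?_ _ rfl
          subst hN
          simp
        rw [goSpec, if_neg hc, ← IH]
        unfold bPair
        rw [hg]
        have hcons : PySem.List.pyRange 0 (gB (t.drop 4) + 1 + 1) =
            0 :: PySem.List.pyRange 1 (gB (t.drop 4) + 1 + 1) := by
          rw [PySem.List.pyRange_one_cons (by omega)]
          norm_num
        simp only [Prod.mk.injEq]
        constructor
        · rw [hcons]
          simp only [List.map_cons, List.flatten_cons]
          congr 1
          · simpa using slice_head4 c t
          · rw [pyRange_map_shift (gB (t.drop 4) + 1)]
            congr 1
            apply List.map_congr_left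
            intro k hk
            have hk0 : 0 ≤ k := (PySem.List.mem_pyRange_one.mp hk).1
            have := slice_drop5 (c :: t) k hk0
            simpa using this
        · rw [PySem.List.slice_from _ (by omega), PySem.List.slice_from _ (by omega)]
          rw [List.drop_drop]
          have hX : (5 * (gB (t.drop 4) + 1 + 1)).toNat = (4 + (5 * (gB (t.drop 4) + 1)).toNat) + 1 := by
            omega
          rw [hX, List.drop_succ_cons]

-- ===== VERDICT (by name: the statement is the Claim_ definition above) =====
theorem parse_value_packet_spec : Claim_equal_parse_value_packet := by
  intro data _ _
  unfold Spec_parse_value_packet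
  rw [alt_eq_bPair, bPair_eq]
  show (pyInt2 (parseA_loop data.toList 0 []).1, String.ofList (parseA_loop data.toList 0 []).2) = _
  rw [parseA_eq]
  simp
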